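-- pv_equiv track=rewrite | github.com/hyelimchoi1223/Algorithm-Study | 프로그래머스/[프로그래머스]42891/ solved.py | solution
-- ===== SOURCE A (Python) =====
-- import heapq
--
-- def solution(food_times, K):
--     if sum(food_times) <= K:
--         return -1
--
--     answer = 0
--     queue = []
--     for idx, time in enumerate(food_times):
--         heapq.heappush(queue, (time, idx + 1))
--
--     sum_value = 0
--     last_time = 0
--     length = len(food_times)
--     while sum_value + ((queue[0][0] - last_time) * length) <= K:
--         time, food = heapq.heappop(queue)
--         sum_value += (time - last_time) * length
--         length -= 1
--         last_time = time
--
--     queue = sorted(queue, key=lambda x: x[1])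
--     return queue[(K - sum_value) % length][1]
-- ===== SOURCE B (Python) =====
-- def solution(food_times, K):
--     if sum(food_times) <= K:
--         return -1
--     n = len(food_times)
--
--     def cost(T):
--         # total seconds consumed if every food is eaten for at most T seconds
--         return sum(min(t, T) for t in food_times)
--
--     # binary search the largest T with cost(T) <= K
--     lo = min(min(food_times), K // n)
--     hi = max(food_times)
--     while hi - lo > 1:
--         mid = lo + (hi - lo) // 2
--         if cost(mid) <= K:
--             lo = mid
--         else:
--             hi = mid
--     remaining = [i + 1 for i, t in enumerate(food_times) if t > lo]
--     return remaining[(K - cost(lo)) % len(remaining)]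
-- ===== Notes on version B (the rewrite author's own statement) =====
-- stated objective: alternative
-- what changed: Replaces the heap-based round simulation (pop foods in ascending time, accumulating elapsed rounds, then re-sort the leftover heap) by a binary search for the largest threshold time T with sum(min(t,T)) <= K, answering directly from the foods with t > T in original index order; no priority queue and no sorting at all.
import Mathlib
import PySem

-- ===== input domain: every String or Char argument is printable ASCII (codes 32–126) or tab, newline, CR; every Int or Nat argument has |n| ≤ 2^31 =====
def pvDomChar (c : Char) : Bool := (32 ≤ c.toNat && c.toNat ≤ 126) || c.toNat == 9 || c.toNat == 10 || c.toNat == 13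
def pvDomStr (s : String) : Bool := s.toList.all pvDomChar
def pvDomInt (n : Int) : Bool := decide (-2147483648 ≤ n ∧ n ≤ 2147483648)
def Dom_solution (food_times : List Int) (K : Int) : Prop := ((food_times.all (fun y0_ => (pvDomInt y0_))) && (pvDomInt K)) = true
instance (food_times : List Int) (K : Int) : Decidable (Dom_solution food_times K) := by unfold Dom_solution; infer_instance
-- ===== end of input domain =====

-- B replaces A's heap simulation by a binary search for the largest threshold time T with
-- sum(min(t, T)) ≤ K (objective: alternative algorithm, same observable results).

-- ===== PORT A =====
-- Python tuple '<' as heapq compares the (time, idx+1) pairs (lexicographic).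
def pyTupLt (a b : Int × Int) : Bool :=
  decide (a.1 < b.1) || (!decide (b.1 < a.1) && decide (a.2 < b.2))

-- heapq's binary heap modeled as a lex-sorted list priority queue: heappush = ordered
-- insert, heappop = take the head (the minimum), queue[0] = head. This is exact for
-- everything A observes of the heap: the peeked minimum, the pop order (all pairs are
-- distinct, so the pop order is unique), and the final multiset, which A re-sorts by index.
def heapPush (x : Int × Int) (q : List (Int × Int)) : List (Int × Int) :=
  match q with
  | [] => [x]
  | y :: ys => if pyTupLt x y then x :: y :: ys else y :: heapPush x ys

-- the while loop; heappop destructs the head. '[]' is where Python's queue[0] raises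
-- IndexError (reachable only for food_times = [] with K < 0, excluded by Pre_).
def solutionLoop (K : Int) : List (Int × Int) → Int → Int → Int → Int
  | [], _, _, _ => 0
  | (time, food) :: rest, sum_value, last_time, length =>
    if sum_value + (time - last_time) * length ≤ K then
      solutionLoop K rest (sum_value + (time - last_time) * length) time (length - 1)
    else
      let queue := PySem.List.sorted ((time, food) :: rest) (fun x => x.2)
      (PySem.List.pyGetD queue (PySem.Int.mod (K - sum_value) length) (0, 0)).2

def solution (food_times : List Int) (K : Int) : Int :=
  if food_times.sum ≤ K then -1
  else
    let queue := (PySem.List.enumerate food_times).foldl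
      (fun q p => heapPush (p.2, p.1 + 1) q) []
    solutionLoop K queue 0 0 (food_times.length : Int)

-- ===== PORT B =====
-- cost(T) = sum(min(t, T) for t in food_times)
def costB (food_times : List Int) (T : Int) : Int :=
  (food_times.map (fun t => min t T)).sum

-- the while loop of Source B: binary search for the largest T with cost(T) ≤ K,
-- maintaining cost(lo) ≤ K < cost(hi)
def bsearchB (food_times : List Int) (K lo hi : Int) : Int :=
  if 1 < hi - lo then
    let mid := lo + PySem.Int.floordiv (hi - lo) 2
    if costB food_times mid ≤ K then bsearchB food_times K mid hi
    else bsearchB food_times K lo mid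
  else lo
termination_by (hi - lo).toNat
decreasing_by
  · have h2 : PySem.Int.floordiv (hi - lo) 2 = (hi - lo) / 2 :=
      PySem.Int.floordiv_eq_ediv_of_pos (by norm_num)
    simp only [h2] at *
    omega
  · have h2 : PySem.Int.floordiv (hi - lo) 2 = (hi - lo) / 2 :=
      PySem.Int.floordiv_eq_ediv_of_pos (by norm_num)
    simp only [h2] at *
    omega

-- Python's min(food_times) / max(food_times) raise ValueError on the empty list
-- (reachable only for food_times = [] with K < 0, excluded by Pre_): '.getD 0' is a
-- dead default there, as is pyGetD's default and mod's value at modulus 0 below.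
def solution_alt (food_times : List Int) (K : Int) : Int :=
  if food_times.sum ≤ K then -1
  else
    let n : Int := (food_times.length : Int)
    let lo := min ((PySem.List.min? food_times (fun x => x)).getD 0) (PySem.Int.floordiv K n)
    let hi := (PySem.List.max? food_times (fun x => x)).getD 0
    let T := bsearchB food_times K lo hi
    let remaining := ((PySem.List.enumerate food_times).filter
      (fun p => decide (T < p.2))).map (fun p => p.1 + 1)
    PySem.List.pyGetD remaining
      (PySem.Int.mod (K - costB food_times T) ((remaining.length : Int))) 0

-- ===== PRECONDITION & SPEC =====
-- Pre_ excludes only food_times = [] with K < 0, where Python's A raises IndexError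
-- on queue[0] (and B's min(food_times) raises ValueError).
def Pre_solution (food_times : List Int) (K : Int) : Prop := food_times = [] → 0 ≤ K
instance (food_times : List Int) (K : Int) : Decidable (Pre_solution food_times K) := by unfold Pre_solution; infer_instance
def pvWitness_solution : List Int × Int := ([3, 1, 2], 5)

def Spec_solution (food_times : List Int) (K : Int) (out : Int) : Prop := out = solution_alt food_times K
instance (food_times : List Int) (K : Int) (out : Int) : Decidable (Spec_solution food_times K out) := by unfold Spec_solution; infer_instance

-- ===== CLAIM (what is proved, stated in full; the proofs are below) =====
def Claim_equal_solution : Prop := ∀ (food_times : List Int) (K : Int), Dom_solution food_times K → Pre_solution food_times K → Spec_solution food_times K (solution food_times K)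

-- ===== LEMMAS AND PROOFS =====

-- the (time, idx) pairs A pushes, in original order, and their time-sorted arrangement
def pairsAll (ft : List Int) : List (Int × Int) :=
  (PySem.List.enumerate ft).map (fun p => (p.2, p.1 + 1))

def foodsOf (ft : List Int) : List (Int × Int) :=
  PySem.List.sorted2 (pairsAll ft) (fun x => x.1) (fun x => x.2)

-- cost over pairs (first components)
def cost2 (q : List (Int × Int)) (T : Int) : Int :=
  (q.map (fun p => min p.1 T)).sum

-- B's answer for a given threshold T
def altAnswer (ft : List Int) (K T : Int) : Int :=
  PySem.List.pyGetD
    (((PySem.List.enumerate ft).filter (fun p => decide (T < p.2))).map (fun p => p.1 + 1))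
    (PySem.Int.mod (K - costB ft T)
      (((((PySem.List.enumerate ft).filter (fun p => decide (T < p.2))).map (fun p => p.1 + 1)).length : Int))) 0

theorem solution_alt_eq (ft : List Int) (K : Int) (hs : ¬ ft.sum ≤ K) :
    solution_alt ft K = altAnswer ft K
      (bsearchB ft K (min ((PySem.List.min? ft (fun x => x)).getD 0)
        (PySem.Int.floordiv K (ft.length : Int)))
        ((PySem.List.max? ft (fun x => x)).getD 0)) := by
  simp only [solution_alt, altAnswer, if_neg hs]

-- heapPush is exactly the ordered insert PySem's sort performs
theorem heapPush_eq_insertBy (x : Int × Int) (q : List (Int × Int)) :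
    heapPush x q = PySem.List.insertBy pyTupLt x q := by
  induction q with
  | nil => rfl
  | cons y ys ih => simp [heapPush, PySem.List.insertBy, ih]

-- building the queue by repeated pushes = the time-then-index sorted pair list
theorem pushAll_eq_foods (l : List Int) :
    (PySem.List.enumerate l).foldl (fun q p => heapPush (p.2, p.1 + 1) q) [] = foodsOf l := by
  have hf : (fun (q : List (Int × Int)) (p : Int × Int) => heapPush (p.2, p.1 + 1) q)
      = (fun (q : List (Int × Int)) (p : Int × Int) => PySem.List.insertBy pyTupLt (p.2, p.1 + 1) q) := by
    funext q p; exact heapPush_eq_insertBy _ _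
  rw [hf]
  simp only [foodsOf, pairsAll, PySem.List.sorted2, List.foldl_map]
  rfl

theorem costB_mono (ft : List Int) {T T' : Int} (h : T ≤ T') : costB ft T ≤ costB ft T' := by
  induction ft with
  | nil => simp [costB]
  | cons t r ih =>
    simp only [costB, List.map_cons, List.sum_cons] at *
    exact add_le_add (min_le_min le_rfl h) ih

theorem costB_all_ge (ft : List Int) (T : Int) (h : ∀ t ∈ ft, T ≤ t) :
    costB ft T = T * ft.length := by
  induction ft with
  | nil => simp [costB]
  | cons t r ih =>
    simp only [costB, List.map_cons, List.sum_cons, List.length_cons] at *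
    rw [min_eq_right (h t (by simp)), ih (fun x hx => h x (by simp [hx]))]
    push_cast; ring

theorem costB_all_le (ft : List Int) (T : Int) (h : ∀ t ∈ ft, t ≤ T) :
    costB ft T = ft.sum := by
  induction ft with
  | nil => simp [costB]
  | cons t r ih =>
    simp only [costB, List.map_cons, List.sum_cons] at *
    rw [min_eq_left (h t (by simp)), ih (fun x hx => h x (by simp [hx]))]

theorem cost2_all_ge (q : List (Int × Int)) (T : Int) (h : ∀ p ∈ q, T ≤ p.1) :
    cost2 q T = T * q.length := by
  induction q with
  | nil => simp [cost2]
  | cons p r ih =>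
    simp only [cost2, List.map_cons, List.sum_cons, List.length_cons] at *
    rw [min_eq_right (h p (by simp)), ih (fun x hx => h x (by simp [hx]))]
    push_cast; ring

theorem cost2_all_le (q : List (Int × Int)) (T : Int) (h : ∀ p ∈ q, p.1 ≤ T) :
    cost2 q T = (q.map (fun p => p.1)).sum := by
  induction q with
  | nil => simp [cost2]
  | cons p r ih =>
    simp only [cost2, List.map_cons, List.sum_cons] at *
    rw [min_eq_left (h p (by simp)), ih (fun x hx => h x (by simp [hx]))]

theorem cost2_append (xs ys : List (Int × Int)) (T : Int) :
    cost2 (xs ++ ys) T = cost2 xs T + cost2 ys T := by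
  simp [cost2]

theorem cost2_split (xs ys : List (Int × Int)) (T1 T2 : Int)
    (hx1 : ∀ p ∈ xs, p.1 ≤ T1) (hx2 : ∀ p ∈ xs, p.1 ≤ T2)
    (hy1 : ∀ p ∈ ys, T1 ≤ p.1) (hy2 : ∀ p ∈ ys, T2 ≤ p.1) :
    cost2 (xs ++ ys) T2 = cost2 (xs ++ ys) T1 + (T2 - T1) * ys.length := by
  rw [cost2_append, cost2_append, cost2_all_le xs T1 hx1, cost2_all_le xs T2 hx2,
    cost2_all_ge ys T1 hy1, cost2_all_ge ys T2 hy2]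
  ring

theorem cost2_perm {q q' : List (Int × Int)} (h : q.Perm q') (T : Int) :
    cost2 q T = cost2 q' T :=
  (h.map _).sum_eq

-- a map over enumerate that reads only the element equals the map over the list
theorem map_snd_comp {β : Type} (f : Int → β) (xs : List Int) :
    ∀ s : Int, (PySem.List.enumerate xs s).map (fun p => f p.2) = xs.map f := by
  induction xs with
  | nil => intro s; simp [PySem.List.enumerate_nil]
  | cons x r ih => intro s; simp [PySem.List.enumerate_cons, ih]

theorem costB_eq_cost2 (ft : List Int) (T : Int) : costB ft T = cost2 (pairsAll ft) T := by
  have hcalc : (pairsAll ft).map (fun p => min p.1 T) = ft.map (fun t => min t T) := by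
    rw [pairsAll, List.map_map]
    exact map_snd_comp (fun t => min t T) ft 0
  rw [costB, cost2, hcalc]

theorem cost2_foods (ft : List Int) (T : Int) : cost2 (foodsOf ft) T = costB ft T := by
  rw [costB_eq_cost2]
  exact cost2_perm (PySem.List.sorted2_perm _ _ _ _) T

theorem sumFst_foods (ft : List Int) : ((foodsOf ft).map (fun p => p.1)).sum = ft.sum := by
  have h1 : ((foodsOf ft).map (fun p => p.1)).sum = ((pairsAll ft).map (fun p => p.1)).sum :=
    ((PySem.List.sorted2_perm _ _ _ _).map _).sum_eq
  rw [h1]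
  have hcalc : (pairsAll ft).map (fun p => p.1) = ft := by
    rw [pairsAll, List.map_map]
    exact (map_snd_comp (fun t => t) ft 0).trans (List.map_id ft)
  rw [hcalc]

theorem length_foods (ft : List Int) : (foodsOf ft).length = ft.length := by
  rw [foodsOf, (PySem.List.sorted2_perm _ _ _ _).length_eq]
  simp [pairsAll, PySem.List.length_enumerate]

theorem foods_ne_nil (ft : List Int) (h : ft ≠ []) : foodsOf ft ≠ [] := by
  intro hc
  apply h
  have := congrArg List.length hc
  rw [length_foods] at this
  simpa using this

-- binary search result: the largest T with cost(T) ≤ K, characterized by its brackets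
theorem bsearchB_spec_aux (ft : List Int) (K : Int) :
    ∀ (m : Nat) (lo hi : Int), (hi - lo).toNat ≤ m →
      costB ft lo ≤ K → K < costB ft hi →
      costB ft (bsearchB ft K lo hi) ≤ K ∧ K < costB ft (bsearchB ft K lo hi + 1) := by
  intro m
  induction m with
  | zero =>
    intro lo hi hm h1 h2
    have hno : ¬ 1 < hi - lo := by omega
    rw [bsearchB, if_neg hno]
    exact ⟨h1, lt_of_lt_of_le h2 (costB_mono ft (by omega))⟩
  | succ m ih =>
    intro lo hi hm h1 h2
    by_cases hc : 1 < hi - lo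
    · rw [bsearchB, if_pos hc]
      have h2' : PySem.Int.floordiv (hi - lo) 2 = (hi - lo) / 2 :=
        PySem.Int.floordiv_eq_ediv_of_pos (by norm_num)
      by_cases hcost : costB ft (lo + PySem.Int.floordiv (hi - lo) 2) ≤ K
      · rw [if_pos hcost]
        exact ih _ _ (by simp only [h2'] at *; omega) hcost h2
      · rw [if_neg hcost]
        exact ih _ _ (by simp only [h2'] at *; omega) h1 (by omega)
    · rw [bsearchB, if_neg hc]
      exact ⟨h1, lt_of_lt_of_le h2 (costB_mono ft (by omega))⟩

theorem bsearchB_spec (ft : List Int) (K lo hi : Int)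
    (h1 : costB ft lo ≤ K) (h2 : K < costB ft hi) :
    costB ft (bsearchB ft K lo hi) ≤ K ∧ K < costB ft (bsearchB ft K lo hi + 1) :=
  bsearchB_spec_aux ft K (hi - lo).toNat lo hi le_rfl h1 h2

-- the insertion-sort comparator of foodsOf, and sortedness on the first component
theorem pyTupLt_prop {a b : Int × Int} :
    pyTupLt a b = true ↔ (a.1 < b.1 ∨ (¬ b.1 < a.1 ∧ a.2 < b.2)) := by
  simp [pyTupLt]

theorem pyTupLt_prop' {a b : Int × Int} :
    pyTupLt a b = false ↔ ¬ (a.1 < b.1 ∨ (¬ b.1 < a.1 ∧ a.2 < b.2)) := by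
  rw [← pyTupLt_prop, Bool.not_eq_true]

theorem pyTupLt_asymm {a b : Int × Int} (h : pyTupLt a b = true) : pyTupLt b a = false := by
  rw [pyTupLt_prop] at h
  rw [pyTupLt_prop']
  omega

theorem insertBy_pairwise (x : Int × Int) (acc : List (Int × Int))
    (h : acc.Pairwise (fun a b => pyTupLt b a = false)) :
    (PySem.List.insertBy pyTupLt x acc).Pairwise (fun a b => pyTupLt b a = false) := by
  induction acc with
  | nil => simp [PySem.List.insertBy]
  | cons y ys ih =>
    rw [List.pairwise_cons] at h
    rw [PySem.List.insertBy]
    by_cases hx : pyTupLt x y = true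
    · rw [if_pos hx]
      refine List.pairwise_cons.2 ⟨?_, List.pairwise_cons.2 ⟨h.1, h.2⟩⟩
      intro z hz
      rcases List.mem_cons.1 hz with rfl | hz
      · exact pyTupLt_asymm hx
      · -- z ∈ ys, y after-relates z; show pyTupLt z x = false
        have hy := h.1 z hz
        rw [pyTupLt_prop] at hx
        rw [pyTupLt_prop'] at hy ⊢
        omega
    · rw [if_neg hx]
      refine List.pairwise_cons.2 ⟨?_, ih h.2⟩
      intro z hz
      rcases (PySem.List.mem_insertBy pyTupLt x z ys).1 hz with rfl | hz
      · exact Bool.not_eq_true _ ▸ hx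
      · exact h.1 z hz

theorem foldl_insertBy_pairwise (xs : List (Int × Int)) :
    ∀ acc : List (Int × Int), acc.Pairwise (fun a b => pyTupLt b a = false) →
    (xs.foldl (fun acc x => PySem.List.insertBy pyTupLt x acc) acc).Pairwise
      (fun a b => pyTupLt b a = false) := by
  induction xs with
  | nil => intro acc h; simpa using h
  | cons x r ih =>
    intro acc h
    exact ih _ (insertBy_pairwise x acc h)

theorem foods_pairwise_fst (ft : List Int) :
    (foodsOf ft).Pairwise (fun a b => a.1 ≤ b.1) := by
  have h : (foodsOf ft).Pairwise (fun a b => pyTupLt b a = false) := by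
    rw [← pushAll_eq_foods]
    have hf : (fun (q : List (Int × Int)) (p : Int × Int) => heapPush (p.2, p.1 + 1) q)
        = (fun (q : List (Int × Int)) (p : Int × Int) => PySem.List.insertBy pyTupLt (p.2, p.1 + 1) q) := by
      funext q p; exact heapPush_eq_insertBy _ _
    rw [hf]
    rw [← List.foldl_map (f := fun p : Int × Int => (p.2, p.1 + 1))
      (g := fun acc x => PySem.List.insertBy pyTupLt x acc)]
    exact foldl_insertBy_pairwise _ [] (by simp)
  refine h.imp ?_
  intro a b hab
  rw [pyTupLt_prop'] at hab
  omega

-- pairsAll is strictly increasing on the index component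
theorem pairsAll_pairwise_snd (ft : List Int) :
    (pairsAll ft).Pairwise (fun a b => a.2 < b.2) := by
  refine (PySem.List.pairwise_lt_enumerate ft 0).map _ ?_
  intro a b h
  omega

-- B's remaining list, written through pairsAll
theorem remaining_eq (ft : List Int) (T : Int) :
    ((PySem.List.enumerate ft).filter (fun p => decide (T < p.2))).map (fun p => p.1 + 1)
      = ((pairsAll ft).filter (fun p => decide (T < p.1))).map (fun p => p.2) := by
  simp [pairsAll, List.filter_map, List.map_map, Function.comp_def]

theorem mod_sub_mul (a c m : Int) (h : 0 < m) :
    PySem.Int.mod (a - c * m) m = PySem.Int.mod a m := by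
  rw [PySem.Int.mod_eq_emod_of_pos h, PySem.Int.mod_eq_emod_of_pos h]
  exact Int.sub_mul_emod_self_right a c m

-- the main loop lemma: from any reachable state of A's loop, its result is B's answer
theorem loop_main (ft : List Int) (K T : Int) (hft : ft ≠ [])
    (hsum : ¬ ft.sum ≤ K)
    (hT1 : costB ft T ≤ K) (hT2 : K < costB ft (T + 1)) :
    ∀ (q : List (Int × Int)) (i : Nat) (s l : Int),
      q = (foodsOf ft).drop i → i ≤ (foodsOf ft).length →
      (∀ p ∈ (foodsOf ft).take i, p.1 ≤ l) →
      (0 < i → (∀ p ∈ (foodsOf ft).drop i, l ≤ p.1) ∧ s ≤ K) →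
      (∀ U, (∀ p ∈ (foodsOf ft).take i, p.1 ≤ U) → (∀ p ∈ (foodsOf ft).drop i, U ≤ p.1) →
        cost2 (foodsOf ft) U = s + (U - l) * (((foodsOf ft).length : Int) - i)) →
      solutionLoop K q s l (((foodsOf ft).length : Int) - i) = altAnswer ft K T := by
  intro q
  induction q with
  | nil =>
    intro i s l hq hi hTake hPos hCEQ
    exfalso
    have hlen : (foodsOf ft).length ≤ i := by
      have h := hq.symm; rwa [List.drop_eq_nil_iff] at h
    have htake : (foodsOf ft).take i = foodsOf ft := List.take_of_length_le hlen
    have hdropnil : (foodsOf ft).drop i = [] := List.drop_eq_nil_iff.2 hlen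
    have hAll : ∀ p ∈ foodsOf ft, p.1 ≤ l := by
      intro p hp; exact hTake p (by rw [htake]; exact hp)
    have h1 := hCEQ l hTake (by simp [hdropnil])
    have h2 : cost2 (foodsOf ft) l = ft.sum := by
      rw [cost2_all_le _ _ hAll, sumFst_foods]
    have hipos : 0 < i := by
      have hne := foods_ne_nil ft hft
      have : 0 < (foodsOf ft).length := List.length_pos_iff.2 hne
      omega
    have hsK := (hPos hipos).2
    have : ft.sum = s := by rw [← h2, h1]; ring
    exact hsum (this ▸ hsK)
  | cons hd rest ih =>
    intro i s l hq hi hTake hPos hCEQ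
    obtain ⟨t, f⟩ := hd
    have hilt : i < (foodsOf ft).length := by
      by_contra hc
      rw [List.drop_eq_nil_iff.2 (Nat.le_of_not_lt hc)] at hq
      exact absurd hq (List.cons_ne_nil _ _)
    have hdropCons : (foodsOf ft).drop i = (foodsOf ft)[i] :: (foodsOf ft).drop (i + 1) :=
      List.drop_eq_getElem_cons hilt
    rw [hdropCons] at hq
    have hgi : (foodsOf ft)[i] = (t, f) := ((List.cons.injEq _ _ _ _ ▸ hq).1).symm
    have hrest : rest = (foodsOf ft).drop (i + 1) := (List.cons.injEq _ _ _ _ ▸ hq).2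
    have hqd : (t, f) :: rest = (foodsOf ft).drop i := by
      rw [hdropCons, hgi, hrest]
    -- sortedness consequences
    have hpw2 : ((foodsOf ft).take i ++ (foodsOf ft).drop i).Pairwise (fun a b => a.1 ≤ b.1) := by
      rw [List.take_append_drop]; exact foods_pairwise_fst ft
    obtain ⟨hpwT, hpwD, hTD⟩ := List.pairwise_append.1 hpw2
    rw [hdropCons] at hpwD
    obtain ⟨hHeadRest, hpwD'⟩ := List.pairwise_cons.1 hpwD
    rw [hgi] at hHeadRest
    have hHeadLe : ∀ p ∈ (foodsOf ft).drop i, t ≤ p.1 := by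
      intro p hp
      rw [hdropCons] at hp
      rcases List.mem_cons.1 hp with rfl | hp
      · rw [hgi]
      · exact hHeadRest p hp
    have hTakeLe : ∀ p ∈ (foodsOf ft).take i, p.1 ≤ t := by
      intro p hp
      have := hTD p hp ((foodsOf ft)[i]) (by rw [hdropCons]; exact List.mem_cons_self ..)
      rwa [hgi] at this
    have hmemHead : (t, f) ∈ (foodsOf ft).take (i + 1) := by
      rw [List.take_add_one, List.getElem?_eq_getElem hilt, hgi]
      exact List.mem_append_right _ (by simp)
    have hcostHead : cost2 (foodsOf ft) t = s + (t - l) * (((foodsOf ft).length : Int) - i) :=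
      hCEQ t hTakeLe hHeadLe
    have hlend : (((foodsOf ft).drop (i + 1)).length : Int) = ((foodsOf ft).length : Int) - (i + 1) := by
      rw [List.length_drop]; omega
    by_cases hcond : s + (t - l) * (((foodsOf ft).length : Int) - i) ≤ K
    · -- pop branch
      simp only [solutionLoop, if_pos hcond]
      have hTake' : ∀ p ∈ (foodsOf ft).take (i + 1), p.1 ≤ t := by
        intro p hp
        rw [List.take_add_one, List.getElem?_eq_getElem hilt, hgi] at hp
        rcases List.mem_append.1 hp with hp | hp
        · exact hTakeLe p hp
        · simp at hp; subst hp; exact le_refl _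
      have hCEQ' : ∀ U, (∀ p ∈ (foodsOf ft).take (i + 1), p.1 ≤ U) →
          (∀ p ∈ (foodsOf ft).drop (i + 1), U ≤ p.1) →
          cost2 (foodsOf ft) U = (s + (t - l) * (((foodsOf ft).length : Int) - i))
            + (U - t) * (((foodsOf ft).length : Int) - (i + 1)) := by
        intro U hU1 hU2
        have hsplit := cost2_split ((foodsOf ft).take (i + 1)) ((foodsOf ft).drop (i + 1)) t U
          hTake' hU1
          (by intro p hp; exact hHeadRest p hp)
          hU2
        rw [List.take_append_drop] at hsplit
        rw [hsplit, hcostHead, hlend]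
      have harith : (((foodsOf ft).length : Int) - i) - 1 = ((foodsOf ft).length : Int) - ((i + 1 : Nat) : Int) := by
        push_cast; ring
      rw [harith]
      exact ih (i + 1) _ t hrest hilt hTake'
        (fun _ => ⟨by intro p hp; exact hHeadRest p hp, hcond⟩) hCEQ'
    · -- exit branch
      simp only [solutionLoop, if_neg hcond]
      have hKlt : K < costB ft t := by
        rw [← cost2_foods, hcostHead]; omega
      have hTlt : T < t := by
        by_contra hc
        have h := costB_mono ft (not_lt.1 hc)
        omega
      have hE1 : ∀ p ∈ (foodsOf ft).take i, p.1 ≤ T := by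
        rcases Nat.eq_zero_or_pos i with rfl | hipos
        · simp
        · have hlT : l ≤ T := by
            have hcl : cost2 (foodsOf ft) l = s := by
              rw [hCEQ l hTake (hPos hipos).1]; ring
            have hclK : costB ft l ≤ K := by rw [← cost2_foods] at *; omega
            by_contra hc
            have : costB ft (T + 1) ≤ costB ft l := costB_mono ft (by omega)
            omega
          intro p hp; exact le_trans (hTake p hp) hlT
      have hE2 : ∀ p ∈ (foodsOf ft).drop i, T < p.1 := by
        intro p hp; exact lt_of_lt_of_le hTlt (hHeadLe p hp)
      have hCEQT : cost2 (foodsOf ft) T = s + (T - l) * (((foodsOf ft).length : Int) - i) :=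
        hCEQ T hE1 (fun p hp => le_of_lt (hE2 p hp))
      have hfilter : (foodsOf ft).filter (fun p => decide (T < p.1)) = (foodsOf ft).drop i := by
        conv_lhs => rw [← List.take_append_drop i (foodsOf ft)]
        rw [List.filter_append,
          List.filter_eq_nil_iff.2 (by intro p hp; simpa using not_lt.2 (hE1 p hp)),
          List.filter_eq_self.2 (by intro p hp; simpa using hE2 p hp)]
        simp
      have hperm : ((pairsAll ft).filter (fun p => decide (T < p.1))).Perm ((foodsOf ft).drop i) := by
        rw [← hfilter]
        exact ((PySem.List.sorted2_perm (pairsAll ft) (fun x => x.1) (fun x => x.2) false).symm).filter _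
      have hsorted : PySem.List.sorted ((t, f) :: rest) (fun x => x.2)
          = (pairsAll ft).filter (fun p => decide (T < p.1)) := by
        rw [hqd]
        exact PySem.List.sorted_eq_of_perm_of_pairwise_lt _ _ _ hperm
          ((pairsAll_pairwise_snd ft).filter _)
      have hlenq : (((pairsAll ft).filter (fun p => decide (T < p.1))).length : Int)
          = ((foodsOf ft).length : Int) - i := by
        rw [hperm.length_eq, List.length_drop]; omega
      have hmpos : 0 < ((foodsOf ft).length : Int) - i := by omega
      have hmod : PySem.Int.mod (K - costB ft T) (((foodsOf ft).length : Int) - i)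
          = PySem.Int.mod (K - s) (((foodsOf ft).length : Int) - i) := by
        rw [← cost2_foods, hCEQT] at *
        rw [show K - (s + (T - l) * (((foodsOf ft).length : Int) - i))
            = (K - s) - (T - l) * (((foodsOf ft).length : Int) - i) by ring]
        exact mod_sub_mul _ _ _ hmpos
      rw [hsorted, altAnswer, remaining_eq, List.length_map, hlenq, hmod]
      exact (PySem.List.pyGetD_map (fun p : Int × Int => p.2)
        ((pairsAll ft).filter (fun p => decide (T < p.1)))
        (PySem.Int.mod (K - s) (((foodsOf ft).length : Int) - i)) ((0 : Int), (0 : Int))).symm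

-- ===== VERDICT (by name: the statement is the Claim_ definition above) =====
theorem solution_spec : Claim_equal_solution := by
  intro ft K _ hpre
  unfold Spec_solution
  by_cases hs : ft.sum ≤ K
  · simp [solution, solution_alt, hs]
  · have hft : ft ≠ [] := by
      intro h; subst h
      exact hs (by simpa using hpre rfl)
    have hnpos : 0 < ft.length := List.length_pos_iff.2 hft
    obtain ⟨mn, hmn⟩ : ∃ m, PySem.List.min? ft (fun x => x) = some m := by
      cases h : PySem.List.min? ft (fun x => x) with
      | none => exact absurd ((PySem.List.min?_eq_none_iff _ _).1 h) hft
      | some m => exact ⟨m, rfl⟩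
    obtain ⟨mx, hmx⟩ : ∃ m, PySem.List.max? ft (fun x => x) = some m := by
      cases h : PySem.List.max? ft (fun x => x) with
      | none => exact absurd ((PySem.List.max?_eq_none_iff _ _).1 h) hft
      | some m => exact ⟨m, rfl⟩
    have hlo : costB ft (min mn (PySem.Int.floordiv K (ft.length : Int))) ≤ K := by
      have hge : ∀ t ∈ ft, min mn (PySem.Int.floordiv K (ft.length : Int)) ≤ t := by
        intro t ht
        exact le_trans (min_le_left _ _) (PySem.List.min?_isMin hmn t ht)
      rw [costB_all_ge _ _ hge]
      have hfd : PySem.Int.floordiv K (ft.length : Int) = K / (ft.length : Int) :=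
        PySem.Int.floordiv_eq_ediv_of_pos (by exact_mod_cast hnpos)
      have h1 : min mn (PySem.Int.floordiv K (ft.length : Int)) ≤ K / (ft.length : Int) := by
        rw [← hfd]; exact min_le_right _ _
      have h2 : min mn (PySem.Int.floordiv K (ft.length : Int)) * (ft.length : Int)
          ≤ (K / (ft.length : Int)) * (ft.length : Int) :=
        mul_le_mul_of_nonneg_right h1 (by positivity)
      have h3 := Int.mul_ediv_add_emod K (ft.length : Int)
      have h4 := Int.emod_nonneg K (by exact_mod_cast Nat.pos_iff_ne_zero.1 hnpos : (ft.length : Int) ≠ 0)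
      linarith
    have hhi : K < costB ft mx := by
      rw [costB_all_le _ _ (fun t ht => PySem.List.max?_isMax hmx t ht)]
      omega
    obtain ⟨hT1, hT2⟩ := bsearchB_spec ft K (min mn (PySem.Int.floordiv K (ft.length : Int))) mx hlo hhi
    have hCEQ0 : ∀ U, (∀ p ∈ (foodsOf ft).take 0, p.1 ≤ U) → (∀ p ∈ (foodsOf ft).drop 0, U ≤ p.1) →
        cost2 (foodsOf ft) U = 0 + (U - 0) * (((foodsOf ft).length : Int) - (0 : Nat)) := by
      intro U _ h2
      rw [cost2_all_ge _ _ (by simpa using h2)]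
      push_cast; ring
    have hloop := loop_main ft K
      (bsearchB ft K (min mn (PySem.Int.floordiv K (ft.length : Int))) mx)
      hft hs hT1 hT2 (foodsOf ft) 0 0 0 rfl (Nat.zero_le _) (by simp)
      (fun h => absurd h (by omega)) hCEQ0
    have hlen0 : (ft.length : Int) = ((foodsOf ft).length : Int) - (0 : Nat) := by
      rw [length_foods]; simp
    rw [solution, if_neg hs, pushAll_eq_foods, hlen0, hloop,
      solution_alt_eq ft K hs, hmn, hmx]
    rfl
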